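-- pv_equiv track=rewrite | github.com/SimpdeDIO/AED_tp2 | funcion 1.py | es_destinatario
-- ===== SOURCE A (Python) =====
-- def es_destinatario(codigo_id):
--     valides = False
--     letras = 0
--     guiones = 0
--
--     for car in codigo_id:
--         if car == " ":
--             continue
--
--         letras += 1
--
--         if "A" <= car <= "Z" or "0" <= car <= "9":
--             valides = True
--             continue
--
--         if car == "-":
--             guiones += 1
--             continue
--
--         else:
--             valides = False
--             break
--     if guiones == letras:
--         valides = False
--
--     return valides
-- ===== SOURCE B (Python) =====
-- def es_destinatario(codigo_id):
--     # Regex-style staged matcher for  -*[A-Z0-9][A-Z0-9-]*  on the space-stripped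
--     # string: skip leading dashes, demand one alphanumeric, then consume the
--     # allowed tail and succeed only if the whole string was consumed.
--     s = codigo_id.replace(' ', '')
--     n = len(s)
--     i = 0
--     while i < n and s[i] == '-':          # -*
--         i += 1
--     if i == n or not ('A' <= s[i] <= 'Z' or '0' <= s[i] <= '9'):
--         return False                      # [A-Z0-9]
--     i += 1
--     while i < n and ('A' <= s[i] <= 'Z' or '0' <= s[i] <= '9' or s[i] == '-'):
--         i += 1                            # [A-Z0-9-]*
--     return i == n
-- ===== Notes on version B (the rewrite author's own statement) =====
-- stated objective: alternative
-- what changed: Replaces A's one-pass flag/counter state machine (with early break and redundant dash-count test) by a regex-style staged matcher on the space-stripped string: skip leading dashes, require one alphanumeric, consume the allowed tail, succeed iff the end is reached.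
import Mathlib
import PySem

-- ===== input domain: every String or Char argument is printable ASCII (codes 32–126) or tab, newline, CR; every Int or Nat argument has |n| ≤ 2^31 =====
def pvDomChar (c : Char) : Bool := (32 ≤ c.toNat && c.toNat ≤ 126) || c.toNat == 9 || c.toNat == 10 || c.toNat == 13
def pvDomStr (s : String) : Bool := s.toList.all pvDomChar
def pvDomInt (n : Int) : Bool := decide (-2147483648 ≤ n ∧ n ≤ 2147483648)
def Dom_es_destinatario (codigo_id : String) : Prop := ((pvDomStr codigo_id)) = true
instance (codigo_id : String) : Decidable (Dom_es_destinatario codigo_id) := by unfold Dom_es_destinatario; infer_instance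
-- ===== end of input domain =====

-- B replaces A's one-pass flag/counter state machine by a regex-style staged
-- matcher (-*[A-Z0-9][A-Z0-9-]* on the space-stripped string).

-- ===== PORT A =====
-- the for-loop of A: state (valides, letras, guiones); break returns immediately
def esLoopA : List Char → Bool → Int → Int → Bool × Int × Int
  | [], valides, letras, guiones => (valides, letras, guiones)
  | car :: rest, valides, letras, guiones =>
    if car = ' ' then esLoopA rest valides letras guiones
    else
      if ('A' ≤ car && car ≤ 'Z') || ('0' ≤ car && car ≤ '9') then
        esLoopA rest true (letras + 1) guiones
      else if car = '-' then esLoopA rest valides (letras + 1) (guiones + 1)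
      else (false, letras + 1, guiones)

def es_destinatario (codigo_id : String) : Bool :=
  let r := esLoopA codigo_id.toList false 0 0
  if r.2.2 = r.2.1 then false else r.1

-- ===== PORT B =====
-- Source B's first while loop ("while i < n and s[i] == '-'"): the index only
-- advances, so it is ported exactly as recursion on the remaining suffix.
def skipDashB : List Char → List Char
  | [] => []
  | c :: rest => if c = '-' then skipDashB rest else c :: rest

-- Source B's second while loop plus the final "return i == n": consume allowed
-- chars; true iff the end of the string is reached.
def tailOkB : List Char → Bool
  | [] => true
  | c :: rest =>
    if ('A' ≤ c && c ≤ 'Z') || ('0' ≤ c && c ≤ '9') || c = '-' then tailOkB rest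
    else false

def es_destinatario_alt (codigo_id : String) : Bool :=
  -- codigo_id.replace(' ', '') deletes every space: exactly filtering them out
  let s := codigo_id.toList.filter (fun c => c ≠ ' ')
  match skipDashB s with
  | [] => false
  | c :: rest =>
    if ('A' ≤ c && c ≤ 'Z') || ('0' ≤ c && c ≤ '9') then tailOkB rest else false

-- ===== PRECONDITION & SPEC =====
def Spec_es_destinatario (codigo_id : String) (out : Bool) : Prop := out = es_destinatario_alt codigo_id
instance (codigo_id : String) (out : Bool) : Decidable (Spec_es_destinatario codigo_id out) := by unfold Spec_es_destinatario; infer_instance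

-- ===== CLAIM =====
def Claim_equal_es_destinatario : Prop := ∀ (codigo_id : String), Dom_es_destinatario codigo_id → Spec_es_destinatario codigo_id (es_destinatario codigo_id)

-- ===== LEMMAS AND PROOFS =====

-- char predicates used by the proof
def okA (c : Char) : Bool := c = ' ' || ('A' ≤ c && c ≤ 'Z') || ('0' ≤ c && c ≤ '9') || c = '-'
def alA (c : Char) : Bool := ('A' ≤ c && c ≤ 'Z') || ('0' ≤ c && c ≤ '9')
def okB (c : Char) : Bool := ('A' ≤ c && c ≤ 'Z') || ('0' ≤ c && c ≤ '9') || c = '-'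

-- A's loop flag: all chars OK and (flag already set, or some alphanumeric seen)
theorem esLoopA_fst (cs : List Char) : ∀ (v : Bool) (l g : Int),
    (esLoopA cs v l g).1 = (cs.all okA && (v || cs.any alA)) := by
  induction cs with
  | nil => intro v l g; simp [esLoopA]
  | cons c rest ih =>
    intro v l g
    by_cases hs : c = ' '
    · subst hs; simp [esLoopA, okA, alA, ih]
    · by_cases ha : (('A' ≤ c && c ≤ 'Z') || ('0' ≤ c && c ≤ '9')) = true
      · simp [esLoopA, hs, ha, ih, okA, alA]
      · by_cases hd : c = '-'
        · subst hd; simp [esLoopA, ih, okA, alA]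
        · simp [esLoopA, hs, ha, hd, okA, alA]

-- invariant: dashes never exceed counted chars; flag true means strictly fewer dashes
theorem esLoopA_lt (cs : List Char) : ∀ (v : Bool) (l g : Int),
    g ≤ l → (v = true → g < l) →
    (esLoopA cs v l g).1 = true → (esLoopA cs v l g).2.2 < (esLoopA cs v l g).2.1 := by
  induction cs with
  | nil =>
    intro v l g hle h hv
    simp only [esLoopA] at hv ⊢
    exact h hv
  | cons c rest ih =>
    intro v l g hle h
    by_cases hs : c = ' '
    · simp only [esLoopA, if_pos hs]; exact ih v l g hle h
    · by_cases ha : (('A' ≤ c && c ≤ 'Z') || ('0' ≤ c && c ≤ '9')) = true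
      · simp only [esLoopA, if_neg hs, if_pos ha]
        exact ih true (l+1) g (by omega) (fun _ => by omega)
      · by_cases hd : c = '-'
        · simp only [esLoopA, if_neg hs, if_neg ha, if_pos hd]
          exact ih v (l+1) (g+1) (by omega) (fun hv => by have := h hv; omega)
        · intro hv; simp [esLoopA, hs, ha, hd] at hv

-- so A as a whole computes: all chars OK and some alphanumeric
theorem esA_eq (s : String) :
    es_destinatario s = (s.toList.all okA && s.toList.any alA) := by
  unfold es_destinatario
  have h1 := esLoopA_fst s.toList false 0 0
  simp only [Bool.false_or] at h1
  by_cases hv : (esLoopA s.toList false 0 0).1 = true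
  · have hlt := esLoopA_lt s.toList false 0 0 le_rfl (by simp) hv
    have hne : ¬ ((esLoopA s.toList false 0 0).2.2 = (esLoopA s.toList false 0 0).2.1) := by omega
    simp only [if_neg hne]
    rw [← h1]
  · have hv' : (esLoopA s.toList false 0 0).1 = false := Bool.eq_false_iff.mpr hv
    rw [← h1, hv']
    show (if (esLoopA s.toList false 0 0).2.2 = (esLoopA s.toList false 0 0).2.1 then false
          else (esLoopA s.toList false 0 0).1) = false
    rw [hv']
    split <;> rfl

-- tailOkB checks that every remaining char is allowed
theorem tailOkB_eq (t : List Char) : tailOkB t = t.all okB := by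
  induction t with
  | nil => rfl
  | cons c rest ih =>
    by_cases h : (('A' ≤ c && c ≤ 'Z') || ('0' ≤ c && c ≤ '9') || c = '-') = true
    · simpa [tailOkB, h, okB] using ih
    · simp [tailOkB, h, okB]

-- B's staged matcher computes: all chars allowed and some alphanumeric
theorem matchB_eq (t : List Char) :
    (match skipDashB t with
     | [] => false
     | c :: rest =>
       if ('A' ≤ c && c ≤ 'Z') || ('0' ≤ c && c ≤ '9') then tailOkB rest else false)
    = (t.all okB && t.any alA) := by
  induction t with
  | nil => rfl
  | cons c rest ih =>
    by_cases hd : c = '-'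
    · subst hd
      have h1 : skipDashB ('-' :: rest) = skipDashB rest := by simp [skipDashB]
      rw [h1, ih]
      simp [okB, alA]
    · have h1 : skipDashB (c :: rest) = c :: rest := by simp [skipDashB, hd]
      rw [h1]
      by_cases ha : (('A' ≤ c && c ≤ 'Z') || ('0' ≤ c && c ≤ '9')) = true
      · have hokB : okB c = true := by simp [okB, ha]
        have halA : alA c = true := ha
        simp [ha, tailOkB_eq, hokB, halA]
      · have halA : alA c = false := Bool.eq_false_iff.mpr ha
        have hokB : okB c = false := by
          have h2 : okB c = (alA c || decide (c = '-')) := by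
            simp [okB, alA, Bool.or_assoc]
          rw [h2, halA, decide_eq_false hd]
          rfl
        simp [ha, hokB]

-- bridging: checks over the raw list vs the space-filtered list
theorem all_okA_filter (cs : List Char) :
    cs.all okA = (cs.filter (fun c => c ≠ ' ')).all okB := by
  induction cs with
  | nil => rfl
  | cons c rest ih =>
    by_cases hs : c = ' '
    · subst hs; simp [okA, ih]
    · simp [okA, okB, hs, ih]

theorem any_alA_filter (cs : List Char) :
    cs.any alA = (cs.filter (fun c => c ≠ ' ')).any alA := by
  induction cs with
  | nil => rfl
  | cons c rest ih =>
    by_cases hs : c = ' '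
    · subst hs; simp [alA, ih]
    · simp [hs, ih]

-- ===== VERDICT =====
theorem es_destinatario_spec : Claim_equal_es_destinatario := by
  intro s _
  unfold Spec_es_destinatario
  rw [esA_eq]
  show _ = es_destinatario_alt s
  unfold es_destinatario_alt
  rw [matchB_eq, ← all_okA_filter, ← any_alA_filter]
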